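-- pv_equiv track=rewrite | github.com/keithhenning/technical-interviews | python/08_065.py | maxKennelCompatibility
-- ===== SOURCE A (Python) =====
-- def maxKennelCompatibility(compatibility):
--
--     n = len(compatibility)
--     grid_size = int(n**0.5)
--     if grid_size * grid_size != n:
--         return -1  # Can't form a perfect square grid
--
--     # Define adjacent positions in the grid
--     def get_adjacent(i, j):
--         directions = [(0, 1), (1, 0), (0, -1), (-1, 0)]
--         adjacent = []
--         for di, dj in directions:
--             ni, nj = i + di, j + dj
--             if 0 <= ni < grid_size and 0 <= nj < grid_size:
--                 adjacent.append((ni, nj))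
--         return adjacent
--
--     # Convert grid position to dog index
--     def pos_to_idx(i, j):
--         return i * grid_size + j
--
--     # Calculate compatibility between two grid positions
--     def get_compatibility(pos1, pos2, assignment):
--         dog1 = assignment[pos1[0]][pos1[1]]
--         dog2 = assignment[pos2[0]][pos2[1]]
--         if dog1 == -1 or dog2 == -1:
--             return 0
--         return compatibility[dog1][dog2]
--
--     # Backtracking function
--     def backtrack(assignment, row, col, used, current_score,
--                   best_score):
--         # If we've filled the entire grid, return the score
--         if row == grid_size:
--             return max(current_score, best_score)
--
--         # Calculate next position
--         next_row, next_col = row, col + 1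
--         if next_col == grid_size:
--             next_row, next_col = row + 1, 0
--
--         # Try placing each dog at the current position
--         for dog in range(n):
--             if not used[dog]:
--                 used[dog] = True
--                 assignment[row][col] = dog
--
--                 # Calculate additional compatibility
--                 # from this placement
--                 additional_score = 0
--                 for adj_row, adj_col in get_adjacent(row, col):
--                     if assignment[adj_row][adj_col] != -1:
--                         additional_score += compatibility[dog][
--                             assignment[adj_row][adj_col]
--                         ]
--
--                 # Recursive call
--                 best_score = backtrack(
--                     assignment, next_row, next_col, used,
--                     current_score + additional_score, best_score
--                 )
--
--                 # Backtrack
--                 assignment[row][col] = -1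
--                 used[dog] = False
--
--         return best_score
--
--     # Initialize grid with -1 (no dog assigned)
--     assignment = [[-1 for _ in range(grid_size)]
--                  for _ in range(grid_size)]
--     used = [False] * n
--
--     return backtrack(assignment, 0, 0, used, 0, 0)
-- ===== SOURCE B (Python) =====
-- def maxKennelCompatibility(compatibility):
--     n = len(compatibility)
--     gs = int(n ** 0.5)
--     if gs * gs != n:
--         return -1  # Can't form a perfect square grid
--     # Build the list of all row-major arrangements by repeatedly inserting
--     # each dog at every position (no backtracking, no mutation).
--     perms = [[]]
--     for d in range(n - 1, -1, -1):
--         perms = [p[:i] + [d] + p[i:] for p in perms for i in range(len(p) + 1)]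
--     # Closed-form score of an arrangement: each cell contributes its
--     # compatibility with the cell to its left and the cell above.
--     def score(p):
--         total = 0
--         for k in range(n):
--             if k % gs:
--                 total += compatibility[p[k]][p[k - 1]]
--             if k >= gs:
--                 total += compatibility[p[k]][p[k - gs]]
--         return total
--     best = 0
--     for p in perms:
--         best = max(best, score(p))
--     return best
-- ===== Notes on version B (the rewrite author's own statement) =====
-- stated objective: alternative
-- what changed: Recursive backtracking over a mutable grid with used-flags and incremental neighbour scoring is replaced by iteratively building the full list of arrangements via insert-at-every-position and scoring each arrangement with a closed-form sum over grid edges, taking the max.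
import Mathlib
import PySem

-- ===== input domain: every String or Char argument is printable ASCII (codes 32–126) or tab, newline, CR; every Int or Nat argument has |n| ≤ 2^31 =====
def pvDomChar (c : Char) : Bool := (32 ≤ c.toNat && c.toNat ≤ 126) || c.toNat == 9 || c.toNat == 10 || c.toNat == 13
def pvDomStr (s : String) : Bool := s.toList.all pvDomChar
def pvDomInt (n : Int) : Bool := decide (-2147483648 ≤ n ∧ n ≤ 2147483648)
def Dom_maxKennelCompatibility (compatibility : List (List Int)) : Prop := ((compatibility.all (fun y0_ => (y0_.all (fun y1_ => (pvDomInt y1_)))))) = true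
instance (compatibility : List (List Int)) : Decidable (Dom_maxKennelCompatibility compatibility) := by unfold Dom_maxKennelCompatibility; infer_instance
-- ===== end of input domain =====

-- B replaces A's recursive grid backtracking by building the list of all arrangements via
-- insert-at-every-position and taking the max of a closed-form edge-sum score (alternative, same cost).


-- ===== PORT A =====
-- int(n**0.5) for a list length n: the number of k ∈ {1..n} with k*k ≤ n (= floor of the square
-- root, kernel-reducible; exact for every length a list can physically have)
def pvSqrt (n : Nat) : Nat := ((List.range (n + 1)).filter (fun k => k * k ≤ n)).length - 1

-- (A's helpers pos_to_idx and get_compatibility are defined but never called in A; not ported.)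
def pvGetAdjacent (gridSize i j : Int) : List (Int × Int) :=
  [((0 : Int), (1 : Int)), (1, 0), (0, -1), (-1, 0)].foldl
    (fun adjacent dd =>
      let ni := i + dd.1
      let nj := j + dd.2
      if 0 ≤ ni ∧ ni < gridSize ∧ 0 ≤ nj ∧ nj < gridSize then adjacent ++ [(ni, nj)]
      else adjacent)
    []

-- fuel = remaining recursion depth (n + 1 from the top is enough; the 0 case is unreachable)
def pvBacktrack (compatibility : List (List Int)) (n : Nat) (gridSize : Int) :
    Nat → List (List Int) → Int → Int → List Bool → Int → Int → Int
  | 0, _, _, _, _, _, best => best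
  | fuel + 1, assignment, row, col, used, currentScore, bestScore =>
    if row = gridSize then max currentScore bestScore else
    let next := if col + 1 = gridSize then (row + 1, (0 : Int)) else (row, col + 1)
    (PySem.List.pyRange 0 (n : Int) 1).foldl
      (fun bestScore dog =>
        if PySem.List.pyGetD used dog false = false then
          let used' := PySem.List.pySetD used dog true
          let assignment' := PySem.List.pySetD assignment row
              (PySem.List.pySetD (PySem.List.pyGetD assignment row []) col dog)
          let additional := (pvGetAdjacent gridSize row col).foldl
            (fun s rc =>
              if PySem.List.pyGetD (PySem.List.pyGetD assignment' rc.1 []) rc.2 (-1) ≠ -1 then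
                s + PySem.List.pyGetD (PySem.List.pyGetD compatibility dog [])
                      (PySem.List.pyGetD (PySem.List.pyGetD assignment' rc.1 []) rc.2 (-1)) 0
              else s) 0
          pvBacktrack compatibility n gridSize fuel assignment' next.1 next.2 used'
            (currentScore + additional) bestScore
        else bestScore)
      bestScore

def maxKennelCompatibility (compatibility : List (List Int)) : Int :=
  let n := compatibility.length
    let gridSize : Int := (pvSqrt n : Int)
  if gridSize * gridSize ≠ (n : Int) then -1
  else
    let assignment : List (List Int) :=
      (PySem.List.pyRange 0 gridSize 1).map
        (fun _ => (PySem.List.pyRange 0 gridSize 1).map (fun _ => (-1 : Int)))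
    let used : List Bool := PySem.List.pyRepeat [false] (n : Int)
    pvBacktrack compatibility n gridSize (n + 1) assignment 0 0 used 0 0

-- ===== PORT B =====
def pvInsertAll (d : Int) (p : List Int) : List (List Int) :=
  (PySem.List.pyRange 0 (PySem.List.len p + 1) 1).map
    (fun i => PySem.List.slice p none (some i) ++ [d] ++ PySem.List.slice p (some i) none)

def pvScore (compatibility : List (List Int)) (n : Nat) (gridSize : Int) (p : List Int) : Int :=
  (PySem.List.pyRange 0 (n : Int) 1).foldl
    (fun total k =>
      let total1 := if PySem.Int.mod k gridSize ≠ 0 then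
          total + PySem.List.pyGetD
              (PySem.List.pyGetD compatibility (PySem.List.pyGetD p k 0) [])
              (PySem.List.pyGetD p (k - 1) 0) 0
        else total
      if gridSize ≤ k then
          total1 + PySem.List.pyGetD
              (PySem.List.pyGetD compatibility (PySem.List.pyGetD p k 0) [])
              (PySem.List.pyGetD p (k - gridSize) 0) 0
        else total1) 0

def maxKennelCompatibility_alt (compatibility : List (List Int)) : Int :=
  let n := compatibility.length
  let gridSize : Int := (pvSqrt n : Int)
  if gridSize * gridSize ≠ (n : Int) then -1
  else
    let perms := (PySem.List.pyRange ((n : Int) - 1) (-1) (-1)).foldl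
        (fun perms d => perms.flatMap (fun p => pvInsertAll d p)) [[]]
    perms.foldl (fun best p => max best (pvScore compatibility n gridSize p)) 0

-- ===== PRECONDITION & SPEC =====
-- Pre_ excludes exactly the inputs on which the Python A raises IndexError: n a perfect square
-- with n ≥ 4 and some row i shorter than the largest dog index it gets compared against
-- (n - 1 other dogs, so length n is needed, except row n-1 which is only indexed up to n-2).
def Pre_maxKennelCompatibility (compatibility : List (List Int)) : Prop :=
  (pvSqrt compatibility.length * pvSqrt compatibility.length = compatibility.length
      ∧ 4 ≤ compatibility.length) →
    ∀ i : Nat, i < compatibility.length →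
      compatibility.length - (if i + 1 = compatibility.length then 1 else 0)
        ≤ (compatibility.getD i []).length
instance (compatibility : List (List Int)) : Decidable (Pre_maxKennelCompatibility compatibility) := by
  unfold Pre_maxKennelCompatibility; infer_instance

def pvWitness_maxKennelCompatibility : List (List Int) :=
  [[0, 1, 2, 3], [1, 0, 1, 2], [2, 1, 0, 1], [3, 2, 1, 0]]

def Spec_maxKennelCompatibility (compatibility : List (List Int)) (out : Int) : Prop := out = maxKennelCompatibility_alt compatibility
instance (compatibility : List (List Int)) (out : Int) : Decidable (Spec_maxKennelCompatibility compatibility out) := by unfold Spec_maxKennelCompatibility; infer_instance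

-- ===== CLAIM (what is proved, stated in full; the proofs are below) =====
def Claim_equal_maxKennelCompatibility : Prop := ∀ (compatibility : List (List Int)), Dom_maxKennelCompatibility compatibility → Pre_maxKennelCompatibility compatibility → Spec_maxKennelCompatibility compatibility (maxKennelCompatibility compatibility)

-- ===== LEMMAS AND PROOFS =====

theorem pvInsertAll_take_drop (d : Int) (p : List Int) :
    pvInsertAll d p = (List.range (p.length + 1)).map (fun k => p.take k ++ [d] ++ p.drop k) := by
  unfold pvInsertAll
  have h : (PySem.List.len p + 1 : Int) = ((p.length + 1 : Nat) : Int) := by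
    simp [PySem.List.len_eq]
  rw [h, PySem.List.pyRange_zero_nat, List.map_map]
  refine List.map_congr_left ?_
  intro k hk
  simp [PySem.List.slice_to_natCast, PySem.List.slice_from_natCast]

theorem pvInsertAll_eq (d : Int) (p : List Int) :
    pvInsertAll d p = List.permutations'Aux d p := by
  rw [pvInsertAll_take_drop]
  induction p with
  | nil => rfl
  | cons y ys ih =>
    rw [List.permutations'Aux, ← ih]
    rw [List.range_succ_eq_map, List.map_cons, List.map_map]
    simp [Function.comp_def]

theorem pvFoldRev (l : List Int) :
    l.reverse.foldl (fun ps d => ps.flatMap (fun p => List.permutations'Aux d p)) [[]]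
      = l.permutations' := by
  induction l with
  | nil => rfl
  | cons d l' ih =>
    rw [List.reverse_cons, List.foldl_append, ih]
    rfl

theorem pvCountdown (m : Nat) :
    PySem.List.pyRange ((m : Int) - 1) (-1) (-1) = (PySem.List.pyRange 0 (m : Int) 1).reverse := by
  rw [PySem.List.pyRange_neg_one, PySem.List.pyRange_one]
  have h1 : ((m : Int) - 1 - (-1)).toNat = m := by omega
  have h2 : ((m : Int) - 0).toNat = m := by omega
  rw [h1, h2, ← List.map_reverse]
  apply List.ext_getElem
  · simp
  · intro i h1' h2'
    have him : i < m := by simpa using h1'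
    simp only [List.getElem_map, List.getElem_reverse, List.getElem_range, List.length_range]
    omega

theorem pvPermsFold (m : Nat) :
    (PySem.List.pyRange ((m : Int) - 1) (-1) (-1)).foldl
        (fun perms d => perms.flatMap (fun p => pvInsertAll d p)) [[]]
      = (PySem.List.pyRange 0 (m : Int) 1).permutations' := by
  simp only [pvInsertAll_eq]
  rw [pvCountdown, pvFoldRev]

def pvCmp (c : List (List Int)) (a b : Int) : Int :=
  PySem.List.pyGetD (PySem.List.pyGetD c a []) b 0

def pvContrib (c : List (List Int)) (g : Nat) (p : List Int) (k : Nat) : Int :=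
  (if k % g ≠ 0 then pvCmp c (p.getD k 0) (p.getD (k - 1) 0) else 0)
  + (if g ≤ k then pvCmp c (p.getD k 0) (p.getD (k - g) 0) else 0)

def pvSc (c : List (List Int)) (g : Nat) (p : List Int) : Int :=
  ((List.range p.length).map (pvContrib c g p)).sum

theorem pvScore_eq (c : List (List Int)) (n g : Nat) (p : List Int) (hp : p.length = n) :
    pvScore c n (g : Int) p = pvSc c g p := by
  unfold pvScore pvSc
  rw [PySem.List.pyRange_zero_nat n, List.foldl_map]
  rw [PySem.List.foldl_congr_mem _ _ (fun total k => total + pvContrib c g p k) 0 ?_]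
  · rw [PySem.List.foldl_add]
    simp [hp]
  · intro acc k hk
    simp only [List.mem_range] at hk
    simp only [PySem.Int.mod_natCast, ne_eq, Int.natCast_eq_zero, Nat.cast_le,
      PySem.List.pyGetD_natCast]
    unfold pvContrib pvCmp
    by_cases h1 : k % g = 0 <;> by_cases h2 : g ≤ k
    · have e2 : ((k : Int) - (g : Int)) = ((k - g : Nat) : Int) := by omega
      simp only [e2, PySem.List.pyGetD_natCast]
      simp [h1, h2]
    · simp [h1, h2]
    · have e1 : ((k : Int) - 1) = ((k - 1 : Nat) : Int) := by
        have : k ≠ 0 := by rintro rfl; simp at h1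
        omega
      have e2 : ((k : Int) - (g : Int)) = ((k - g : Nat) : Int) := by omega
      simp only [e1, e2, PySem.List.pyGetD_natCast]
      simp [h1, h2]
      ring
    · have e1 : ((k : Int) - 1) = ((k - 1 : Nat) : Int) := by
        have : k ≠ 0 := by rintro rfl; simp at h1
        omega
      simp only [e1, PySem.List.pyGetD_natCast]
      simp [h1, h2]

def pvComps (n : Nat) : List Int → Nat → List (List Int)
  | _, 0 => [[]]
  | p, m + 1 =>
    (List.range n).flatMap
      (fun (d : Nat) => if (d : Int) ∈ p then []
                else (pvComps n (p ++ [(d : Int)]) m).map ((d : Int) :: ·))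

theorem pvMem_comps (n : Nat) (m : Nat) (p e : List Int) :
    e ∈ pvComps n p m ↔
      e.length = m ∧ e.Nodup ∧ ∀ x ∈ e, 0 ≤ x ∧ x < (n : Int) ∧ x ∉ p := by
  induction m generalizing p e with
  | zero =>
    simp only [pvComps, List.mem_singleton]
    constructor
    · rintro rfl; simp
    · rintro ⟨h, -, -⟩; exact List.eq_nil_of_length_eq_zero h
  | succ m ih =>
    simp only [pvComps, List.mem_flatMap, List.mem_range]
    constructor
    · rintro ⟨d, hd, he⟩
      by_cases hdp : (d : Int) ∈ p
      · simp [hdp] at he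
      · simp only [if_neg hdp, List.mem_map] at he
        obtain ⟨e', he', rfl⟩ := he
        obtain ⟨hlen, hnd, hall⟩ := (ih _ _).mp he'
        refine ⟨by simp [hlen], ?_, ?_⟩
        · refine List.nodup_cons.mpr ⟨fun hmem => ?_, hnd⟩
          have := (hall _ hmem).2.2
          simp at this
        · intro x hx
          rcases List.mem_cons.mp hx with rfl | hx'
          · exact ⟨Int.natCast_nonneg d, by exact_mod_cast hd, hdp⟩
          · have := hall _ hx'
            refine ⟨this.1, this.2.1, fun hxp => this.2.2 (by simp [hxp])⟩
    · rintro ⟨hlen, hnd, hall⟩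
      match e, hlen with
      | x :: e', hlen =>
        obtain ⟨hx0, hxn, hxp⟩ := hall x (by simp)
        refine ⟨x.toNat, by omega, ?_⟩
        have hcast : ((x.toNat : Int)) = x := by omega
        rw [hcast, if_neg hxp, List.mem_map]
        refine ⟨e', (ih _ _).mpr ⟨by simpa using hlen, (List.nodup_cons.mp hnd).2, ?_⟩, rfl⟩
        intro y hy
        have hyall := hall y (by simp [hy])
        refine ⟨hyall.1, hyall.2.1, fun hmem => ?_⟩
        rcases List.mem_append.mp hmem with h | h
        · exact hyall.2.2 h
        · have : y = x := by simpa using h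
          exact (List.nodup_cons.mp hnd).1 (this ▸ hy)

theorem pvNodup_comps (n m : Nat) (p : List Int) : (pvComps n p m).Nodup := by
  induction m generalizing p with
  | zero => simp [pvComps]
  | succ m ih =>
    rw [pvComps, List.nodup_flatMap]
    constructor
    · intro d _
      split
      · exact List.nodup_nil
      · exact (ih _).map (fun a b h => by simpa using h)
    · refine (List.pairwise_lt_range).imp ?_
      intro a b hab e hea heb
      have ha : ∃ t, e = (a : Int) :: t := by
        by_cases h : (a : Int) ∈ p
        · simp [h] at hea
        · simp only [if_neg h, List.mem_map] at hea
          obtain ⟨t, -, rfl⟩ := hea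
          exact ⟨t, rfl⟩
      have hb : ∃ t, e = (b : Int) :: t := by
        by_cases h : (b : Int) ∈ p
        · simp [h] at heb
        · simp only [if_neg h, List.mem_map] at heb
          obtain ⟨t, -, rfl⟩ := heb
          exact ⟨t, rfl⟩
      obtain ⟨t1, rfl⟩ := ha
      obtain ⟨t2, he⟩ := hb
      have : (a : Int) = (b : Int) := by simpa using congrArg (fun l => l.headI) he
      omega

def pvExt (c : List (List Int)) (g : Nat) (p e : List Int) : Int :=
  ((List.range e.length).map (fun j => pvContrib c g (p ++ e) (p.length + j))).sum

theorem pvExt_nil (c : List (List Int)) (g : Nat) (p : List Int) : pvExt c g p [] = 0 := rfl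

theorem pvContrib_prefix (c : List (List Int)) (g : Nat) (q e : List Int) (k : Nat)
    (hk : k < q.length) : pvContrib c g (q ++ e) k = pvContrib c g q k := by
  unfold pvContrib
  rw [List.getD_append _ _ _ _ hk, List.getD_append _ _ _ _ (by omega),
    List.getD_append _ _ _ _ (by omega)]

theorem pvExt_cons (c : List (List Int)) (g : Nat) (p e : List Int) (d : Int) :
    pvExt c g p (d :: e)
      = pvContrib c g (p ++ [d]) p.length + pvExt c g (p ++ [d]) e := by
  unfold pvExt
  have hq : p ++ d :: e = (p ++ [d]) ++ e := by simp
  rw [hq]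
  simp only [List.length_cons, List.range_succ_eq_map, List.map_cons, List.map_map, List.sum_cons]
  congr 1
  · rw [Nat.add_zero]
    exact pvContrib_prefix c g (p ++ [d]) e p.length (by simp)
  · refine congrArg List.sum (List.map_congr_left ?_)
    intro j hj
    simp only [Function.comp_apply, List.length_append, List.length_singleton]
    congr 1
    omega

def pvGrid (g : Nat) (p : List Int) : List (List Int) :=
  (List.range g).map (fun i => (List.range g).map
    (fun j => if i * g + j < p.length then p.getD (i * g + j) 0 else -1))

def pvUsed (n : Nat) (p : List Int) : List Bool :=
  (List.range n).map (fun (d : Nat) => decide ((d : Int) ∈ p))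

theorem pvSetMapRange {α : Type} (m : Nat) (f : Nat → α) (i : Nat) (v : α) :
    ((List.range m).map f).set i v
      = (List.range m).map (fun j => if j = i then v else f j) := by
  apply List.ext_getElem
  · simp
  · intro j hj hj'
    have hjm : j < m := by simpa using hj'
    rw [List.getElem_set]
    rcases eq_or_ne i j with rfl | h
    · simp
    · simp [h, Ne.symm h]

theorem pvGrid_get (g : Nat) (q : List Int) (a b : Int)
    (ha : 0 ≤ a) (ha' : a < (g : Int)) (hb : 0 ≤ b) (hb' : b < (g : Int)) :
    PySem.List.pyGetD (PySem.List.pyGetD (pvGrid g q) a []) b (-1)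
      = if a.toNat * g + b.toNat < q.length then q.getD (a.toNat * g + b.toNat) 0 else -1 := by
  rw [PySem.List.pyGetD_eq_getElem _ _ ha (by simpa [pvGrid] using ha')]
  unfold pvGrid
  rw [List.getElem_map, List.getElem_range]
  rw [PySem.List.pyGetD_eq_getElem _ _ hb (by simpa using hb')]
  rw [List.getElem_map, List.getElem_range]

theorem pvGrid_set (g : Nat) (q : List Int) (r co : Nat) (v : Int)
    (hr : r < g) (hco : co < g) (hq : q.length = r * g + co) :
    PySem.List.pySetD (pvGrid g q) ((r : Nat) : Int)
        (PySem.List.pySetD (PySem.List.pyGetD (pvGrid g q) ((r : Nat) : Int) []) ((co : Nat) : Int) v)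
      = pvGrid g (q ++ [v]) := by
  rw [PySem.List.pyGetD_eq_getElem _ _ (Int.natCast_nonneg r) (by simpa [pvGrid] using (by exact_mod_cast hr : (r:Int) < (g:Int)))]
  rw [PySem.List.pySetD_natCast, PySem.List.pySetD_natCast]
  unfold pvGrid
  rw [List.getElem_map, List.getElem_range, pvSetMapRange, pvSetMapRange]
  simp only [Int.toNat_natCast]
  refine List.map_congr_left ?_
  intro i hi
  have him : i < g := by simpa using hi
  by_cases hir : i = r
  · subst hir
    rw [if_pos rfl]
    refine List.map_congr_left ?_
    intro j hj
    have hjm : j < g := by simpa using hj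
    by_cases hjc : j = co
    · subst hjc
      simp only [List.length_append, List.length_singleton]
      rw [if_pos trivial, if_pos (by omega), ← hq, List.getD_eq_getElem?_getD,
        List.getElem?_append_right (le_refl _)]
      simp
    · rw [if_neg hjc]
      by_cases hlt : i * g + j < q.length
      · rw [if_pos hlt, if_pos (by simp; omega), List.getD_append _ _ _ _ hlt]
      · rw [if_neg hlt, if_neg (by simp; omega)]
  · rw [if_neg hir]
    refine List.map_congr_left ?_
    intro j hj
    have hjm : j < g := by simpa using hj
    by_cases hlt : i * g + j < q.length
    · rw [if_pos hlt, if_pos (by simp; omega), List.getD_append _ _ _ _ hlt]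
    · rw [if_neg hlt, if_neg ?_]
      simp only [List.length_append, List.length_singleton]
      -- i ≠ r, not < q.length: show ¬ (i*g+j < q.length + 1), i.e. i*g+j ≠ q.length
      rcases Nat.lt_or_ge i r with h | h
      · -- i < r: i*g+j ≤ (r-1)*g + (g-1) = r*g - 1 < q.length, contradiction with hlt
        exfalso
        apply hlt
        have : i * g + j < r * g := by
          calc i * g + j < i * g + g := by omega
          _ = (i + 1) * g := by ring
          _ ≤ r * g := Nat.mul_le_mul_right g (by omega)
        omega
      · have hgt : r < i := by omega
        have : r * g + g ≤ i * g := by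
          calc r * g + g = (r + 1) * g := by ring
          _ ≤ i * g := Nat.mul_le_mul_right g (by omega)
        omega

theorem pvUsed_get (n : Nat) (q : List Int) (d : Nat) (hd : d < n) :
    PySem.List.pyGetD (pvUsed n q) ((d : Nat) : Int) false = decide ((d : Int) ∈ q) := by
  rw [PySem.List.pyGetD_natCast]
  unfold pvUsed
  rw [List.getD_eq_getElem?_getD, List.getElem?_map, List.getElem?_range hd]
  rfl

theorem pvUsed_set (n : Nat) (q : List Int) (d : Nat) (hd : d < n) :
    PySem.List.pySetD (pvUsed n q) ((d : Nat) : Int) true = pvUsed n (q ++ [(d : Int)]) := by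
  rw [PySem.List.pySetD_natCast]
  unfold pvUsed
  rw [pvSetMapRange]
  refine List.map_congr_left ?_
  intro j hj
  by_cases hjd : j = d
  · subst hjd; simp
  · rw [if_neg hjd]
    have : ((j : Int) = (d : Int)) ↔ False := by
      constructor
      · intro h; exact hjd (by exact_mod_cast h)
      · exact False.elim
    simp [this]

theorem pvAdj_eq (g r co : Nat) (hr : r < g) (hco : co < g) :
    pvGetAdjacent (g : Int) (r : Int) (co : Int) =
      ((if co + 1 < g then [((r : Int), (co : Int) + 1)] else []) ++
       (if r + 1 < g then [((r : Int) + 1, (co : Int))] else []) ++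
       (if 0 < co then [((r : Int), (co : Int) - 1)] else []) ++
       (if 0 < r then [((r : Int) - 1, (co : Int))] else [])) := by
  unfold pvGetAdjacent
  simp only [List.foldl_cons, List.foldl_nil]
  norm_num
  have c1 : (1 ≤ r ∧ r ≤ g ∧ co < g) ↔ 0 < r := by omega
  have c2 : (r < g ∧ 1 ≤ co ∧ co ≤ g) ↔ 0 < co := by omega
  have c3 : ((0:Int) ≤ (r:Int) + 1 ∧ (r:Int) + 1 < (g:Int) ∧ co < g) ↔ r + 1 < g := by
    omega
  have c4 : (r < g ∧ (0:Int) ≤ (co:Int) + 1 ∧ (co:Int) + 1 < (g:Int)) ↔ co + 1 < g := by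
    omega
  simp only [c1, c2, c3, c4]
  split_ifs <;> simp [sub_eq_add_neg]

theorem pvAdditional (c : List (List Int)) (g r co : Nat) (q : List Int) (dog : Int)
    (hr : r < g) (hco : co < g) (hq : q.length = r * g + co + 1)
    (hpos : ∀ x ∈ q, 0 ≤ x) (hdog : q.getD (r * g + co) 0 = dog) :
    (pvGetAdjacent (g : Int) (r : Int) (co : Int)).foldl
      (fun s rc =>
        if PySem.List.pyGetD (PySem.List.pyGetD (pvGrid g q) rc.1 []) rc.2 (-1) ≠ -1 then
          s + PySem.List.pyGetD (PySem.List.pyGetD c dog [])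
                (PySem.List.pyGetD (PySem.List.pyGetD (pvGrid g q) rc.1 []) rc.2 (-1)) 0
        else s) 0
    = pvContrib c g q (r * g + co) := by
  have hmem : ∀ i : Nat, i < q.length → q.getD i 0 ≠ -1 := by
    intro i hi
    have h0 : 0 ≤ q.getD i 0 := by
      apply hpos
      rw [List.getD_eq_getElem _ _ hi]
      exact List.getElem_mem hi
    omega
  rw [pvAdj_eq g r co hr hco]
  rw [List.foldl_append, List.foldl_append, List.foldl_append]
  -- right neighbour: cell not yet filled, contributes nothing
  have h1 : ∀ s : Int, (if co + 1 < g then [((r : Int), (co : Int) + 1)] else []).foldl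
      (fun s rc =>
        if PySem.List.pyGetD (PySem.List.pyGetD (pvGrid g q) rc.1 []) rc.2 (-1) ≠ -1 then
          s + PySem.List.pyGetD (PySem.List.pyGetD c dog [])
                (PySem.List.pyGetD (PySem.List.pyGetD (pvGrid g q) rc.1 []) rc.2 (-1)) 0
        else s) s = s := by
    intro s
    split
    case isTrue h =>
      have hcast : ((co : Int) + 1) = ((co + 1 : Nat) : Int) := by push_cast; ring
      simp only [List.foldl_cons, List.foldl_nil, hcast]
      rw [pvGrid_get g q _ _ (Int.natCast_nonneg r) (by exact_mod_cast hr)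
        (Int.natCast_nonneg _) (by exact_mod_cast h)]
      simp only [Int.toNat_natCast]
      rw [if_neg (by omega)]
    case isFalse h => rfl
  -- down neighbour: cell not yet filled, contributes nothing
  have h2 : ∀ s : Int, (if r + 1 < g then [((r : Int) + 1, (co : Int))] else []).foldl
      (fun s rc =>
        if PySem.List.pyGetD (PySem.List.pyGetD (pvGrid g q) rc.1 []) rc.2 (-1) ≠ -1 then
          s + PySem.List.pyGetD (PySem.List.pyGetD c dog [])
                (PySem.List.pyGetD (PySem.List.pyGetD (pvGrid g q) rc.1 []) rc.2 (-1)) 0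
        else s) s = s := by
    intro s
    split
    case isTrue h =>
      have hcast : ((r : Int) + 1) = ((r + 1 : Nat) : Int) := by push_cast; ring
      simp only [List.foldl_cons, List.foldl_nil, hcast]
      rw [pvGrid_get g q _ _ (Int.natCast_nonneg _) (by exact_mod_cast h)
        (Int.natCast_nonneg _) (by exact_mod_cast hco)]
      simp only [Int.toNat_natCast]
      rw [if_neg (by
        have e : (r + 1) * g = r * g + g := by ring
        omega)]
    case isFalse h => rfl
  rw [h2, h1]
  unfold pvContrib pvCmp
  have hkmod : (r * g + co) % g = co := by
    rw [Nat.mul_comm, Nat.mul_add_mod, Nat.mod_eq_of_lt hco]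
  by_cases hc0 : 0 < co <;> by_cases hr0 : 0 < r
  · -- left and up neighbours both present
    have hcast1 : ((co : Int) - 1) = ((co - 1 : Nat) : Int) := by omega
    have hcast2 : ((r : Int) - 1) = ((r - 1 : Nat) : Int) := by omega
    have e : (r - 1) * g + g = r * g := by
      have h : r - 1 + 1 = r := by omega
      calc (r - 1) * g + g = ((r - 1) + 1) * g := by ring
        _ = r * g := by rw [h]
    rw [if_pos hc0, if_pos hr0]
    simp only [List.foldl_cons, List.foldl_nil, hcast1, hcast2]
    rw [pvGrid_get g q ((r : Nat) : Int) (((co - 1 : Nat) : Nat) : Int)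
      (Int.natCast_nonneg _) (by exact_mod_cast hr) (Int.natCast_nonneg _)
      (by exact_mod_cast (by omega : co - 1 < g))]
    rw [pvGrid_get g q (((r - 1 : Nat) : Nat) : Int) ((co : Nat) : Int)
      (Int.natCast_nonneg _) (by exact_mod_cast (by omega : r - 1 < g)) (Int.natCast_nonneg _)
      (by exact_mod_cast hco)]
    simp only [Int.toNat_natCast]
    rw [if_pos (by omega : r * g + (co - 1) < q.length)]
    rw [if_pos (by omega : (r - 1) * g + co < q.length)]
    rw [if_pos (hmem _ (by omega)), if_pos (hmem _ (by omega))]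
    rw [hdog, if_pos (by simp [hkmod]; omega), if_pos (by omega : g ≤ r * g + co)]
    have i1 : r * g + co - 1 = r * g + (co - 1) := by omega
    have i2 : r * g + co - g = (r - 1) * g + co := by omega
    rw [i1, i2]
    ring
  · -- only the left neighbour present
    have hcast1 : ((co : Int) - 1) = ((co - 1 : Nat) : Int) := by omega
    rw [if_pos hc0, if_neg hr0]
    simp only [List.foldl_cons, List.foldl_nil, hcast1]
    rw [pvGrid_get g q ((r : Nat) : Int) (((co - 1 : Nat) : Nat) : Int)
      (Int.natCast_nonneg _) (by exact_mod_cast hr) (Int.natCast_nonneg _)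
      (by exact_mod_cast (by omega : co - 1 < g))]
    simp only [Int.toNat_natCast]
    have hr' : r = 0 := by omega
    rw [if_pos (by omega : r * g + (co - 1) < q.length)]
    rw [if_pos (hmem _ (by omega))]
    rw [hdog, if_pos (by simp [hkmod]; omega), if_neg (by subst hr'; simpa using by omega : ¬ g ≤ r * g + co)]
    have i1 : r * g + co - 1 = r * g + (co - 1) := by omega
    rw [i1]
    ring
  · -- only the up neighbour present
    have hcast2 : ((r : Int) - 1) = ((r - 1 : Nat) : Int) := by omega
    have e : (r - 1) * g + g = r * g := by
      have h : r - 1 + 1 = r := by omega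
      calc (r - 1) * g + g = ((r - 1) + 1) * g := by ring
        _ = r * g := by rw [h]
    rw [if_neg hc0, if_pos hr0]
    simp only [List.foldl_cons, List.foldl_nil, hcast2]
    rw [pvGrid_get g q (((r - 1 : Nat) : Nat) : Int) ((co : Nat) : Int)
      (Int.natCast_nonneg _) (by exact_mod_cast (by omega : r - 1 < g)) (Int.natCast_nonneg _)
      (by exact_mod_cast hco)]
    simp only [Int.toNat_natCast]
    rw [if_pos (by omega : (r - 1) * g + co < q.length)]
    rw [if_pos (hmem _ (by omega))]
    rw [hdog, if_neg (by simp [hkmod]; omega), if_pos (by omega : g ≤ r * g + co)]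
    have i2 : r * g + co - g = (r - 1) * g + co := by omega
    rw [i2]
  · -- no earlier neighbour
    rw [if_neg hc0, if_neg hr0]
    have hr' : r = 0 := by omega
    rw [if_neg (by simp [hkmod]; omega), if_neg (by subst hr'; simpa using by omega : ¬ g ≤ r * g + co)]
    simp

theorem pvBridge (c : List (List Int)) (g : Nat) (hg : g * g = c.length) :
    ∀ (m : Nat) (p : List Int) (cur best : Int) (fuel : Nat),
      p.length + m = c.length → (∀ x ∈ p, 0 ≤ x) → m + 1 ≤ fuel →
      pvBacktrack c c.length (g : Int) fuel (pvGrid g p)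
          ((p.length / g : Nat) : Int) ((p.length % g : Nat) : Int) (pvUsed c.length p) cur best
        = (pvComps c.length p m).foldl (fun b e => max b (cur + pvExt c g p e)) best := by
  intro m
  induction m with
  | zero =>
    intro p cur best fuel hlen hpos hfuel
    obtain ⟨f, rfl⟩ : ∃ f, fuel = f + 1 := ⟨fuel - 1, by omega⟩
    have hdiv : p.length / g = g := by
      rcases Nat.eq_zero_or_pos g with h0 | h0
      · subst h0; simp at hg; omega
      · rw [(by omega : p.length = g * g), Nat.mul_div_cancel_left g h0]
    rw [pvBacktrack, hdiv, if_pos rfl]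
    simp only [pvComps, List.foldl_cons, List.foldl_nil, pvExt_nil]
    rw [add_zero, max_comm]
  | succ m ih =>
    intro p cur best fuel hlen hpos hfuel
    obtain ⟨f, rfl⟩ : ∃ f, fuel = f + 1 := ⟨fuel - 1, by omega⟩
    have hn0 : 0 < c.length := by omega
    have hg0 : 0 < g := by
      rcases Nat.eq_zero_or_pos g with h0 | h0
      · subst h0; simp at hg; omega
      · exact h0
    have hk : p.length < c.length := by omega
    have hr : p.length / g < g := by
      rw [Nat.div_lt_iff_lt_mul hg0]
      omega
    have hco : p.length % g < g := Nat.mod_lt _ hg0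
    have hdm : g * (p.length / g) + p.length % g = p.length := Nat.div_add_mod _ _
    have hdm' : p.length / g * g + p.length % g = p.length := by
      rw [Nat.mul_comm] at hdm; omega
    rw [pvBacktrack]
    rw [if_neg (by exact_mod_cast Nat.ne_of_lt hr)]
    rw [pvComps, List.foldl_flatMap]
    rw [PySem.List.pyRange_zero_nat, List.foldl_map]
    refine PySem.List.foldl_congr_mem _ _ _ _ ?_
    intro b d hd
    have hdn : d < c.length := by simpa using hd
    rw [pvUsed_get _ _ _ hdn]
    by_cases hdp : (d : Int) ∈ p
    · rw [if_neg (by simp [hdp]), if_pos hdp]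
      rfl
    · rw [if_pos (by simp [hdp]), if_neg hdp]
      simp only []
      -- state updates
      rw [pvGrid_set g p (p.length / g) (p.length % g) (d : Int) hr hco (by omega)]
      rw [pvUsed_set _ _ _ hdn]
      have hqlen : (p ++ [(d : Int)]).length = (p.length / g) * g + p.length % g + 1 := by
        simp; omega
      have hqpos : ∀ x ∈ p ++ [(d : Int)], 0 ≤ x := by
        intro x hx
        rcases List.mem_append.mp hx with h | h
        · exact hpos x h
        · simpa using (by simp at h; simp [h] : x = (d : Int)) ▸ Int.natCast_nonneg d
      have hqdog : (p ++ [(d : Int)]).getD ((p.length / g) * g + p.length % g) 0 = (d : Int) := by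
        rw [(by omega : (p.length / g) * g + p.length % g = p.length)]
        rw [List.getD_eq_getElem?_getD, List.getElem?_append_right (le_refl _)]
        simp
      rw [pvAdditional c g (p.length / g) (p.length % g) (p ++ [(d : Int)]) (d : Int)
        hr hco hqlen hqpos hqdog]
      -- the next position
      have hnext : (if ((p.length % g : Nat) : Int) + 1 = (g : Int)
            then (((p.length / g : Nat) : Int) + 1, (0 : Int))
            else (((p.length / g : Nat) : Int), ((p.length % g : Nat) : Int) + 1))
          = ((((p ++ [(d : Int)]).length / g : Nat) : Int),
             (((p ++ [(d : Int)]).length % g : Nat) : Int)) := by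
        simp only [List.length_append, List.length_singleton]
        by_cases hcg : p.length % g + 1 = g
        · rw [if_pos (by exact_mod_cast hcg)]
          have h1 : (p.length + 1) / g = p.length / g + 1 := by
            rw [(by omega : p.length + 1 = p.length % g + 1 + g * (p.length / g))]
            rw [hcg, Nat.mul_comm]
            rw [Nat.add_mul_div_right _ _ hg0, Nat.div_self hg0]
            omega
          have h2 : (p.length + 1) % g = 0 := by
            rw [(by omega : p.length + 1 = p.length % g + 1 + g * (p.length / g))]
            rw [hcg, Nat.mul_comm]
            rw [Nat.add_mul_mod_self_right, Nat.mod_self]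
          rw [h1, h2]
          simp
        · rw [if_neg (by exact_mod_cast hcg)]
          have h1 : (p.length + 1) / g = p.length / g := by
            rw [(by omega : p.length + 1 = p.length % g + 1 + g * (p.length / g))]
            rw [Nat.mul_comm, Nat.add_mul_div_right _ _ hg0,
              Nat.div_eq_of_lt (by omega)]
            omega
          have h2 : (p.length + 1) % g = p.length % g + 1 := by
            rw [(by omega : p.length + 1 = p.length % g + 1 + g * (p.length / g))]
            rw [Nat.mul_comm, Nat.add_mul_mod_self_right, Nat.mod_eq_of_lt (by omega)]
          rw [h1, h2]
          push_cast
          rfl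
      rw [hnext]
      rw [ih (p ++ [(d : Int)]) (cur + pvContrib c g (p ++ [(d : Int)]) ((p.length / g) * g + p.length % g))
        b f (by simp; omega) hqpos (by omega)]
      rw [List.foldl_map]
      refine PySem.List.foldl_congr_mem _ _ _ _ ?_
      intro acc e he
      rw [pvExt_cons]
      have hkk : (p.length / g) * g + p.length % g = p.length := by omega
      rw [hkk, add_assoc]

theorem pvExt_nil_left (c : List (List Int)) (g : Nat) (e : List Int) :
    pvExt c g [] e = pvSc c g e := by
  unfold pvExt pvSc
  simp

theorem pvA_eq (c : List (List Int)) (g : Nat) (hg : g = pvSqrt c.length)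
    (hsq : g * g = c.length) :
    maxKennelCompatibility c
      = (pvComps c.length [] c.length).foldl (fun b e => max b (pvSc c g e)) 0 := by
  subst hg
  unfold maxKennelCompatibility
  rw [if_neg (not_not_intro (by exact_mod_cast hsq))]
  have hgrid : (PySem.List.pyRange 0 ((pvSqrt c.length : Nat) : Int) 1).map
      (fun _ => (PySem.List.pyRange 0 ((pvSqrt c.length : Nat) : Int) 1).map (fun _ => (-1 : Int)))
      = pvGrid (pvSqrt c.length) [] := by
    rw [PySem.List.pyRange_zero_nat]
    unfold pvGrid
    simp [Function.comp_def]
  have hused : PySem.List.pyRepeat [false] ((c.length : Nat) : Int) = pvUsed c.length [] := by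
    rw [PySem.List.pyRepeat_singleton]
    unfold pvUsed
    simp
  rw [hgrid, hused]
  have hB := pvBridge c (pvSqrt c.length) hsq c.length [] 0 0 (c.length + 1)
    (by simp) (by simp) (by omega)
  simp only [List.length_nil, Nat.zero_div, Nat.zero_mod, Nat.cast_zero] at hB
  rw [hB]
  refine PySem.List.foldl_congr_mem _ _ _ _ ?_
  intro b e _
  rw [pvExt_nil_left, zero_add]

theorem pvB_eq (c : List (List Int)) (g : Nat) (hg : g = pvSqrt c.length)
    (hsq : g * g = c.length) :
    maxKennelCompatibility_alt c
      = ((PySem.List.pyRange 0 (c.length : Int) 1).permutations').foldl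
          (fun b e => max b (pvSc c g e)) 0 := by
  subst hg
  unfold maxKennelCompatibility_alt
  rw [if_neg (not_not_intro (by exact_mod_cast hsq))]
  rw [pvPermsFold c.length]
  refine PySem.List.foldl_congr_mem _ _ _ _ ?_
  intro b e he
  have hlen : e.length = c.length := by
    have := (List.mem_permutations'.mp he).length_eq
    simp [PySem.List.length_pyRange_one] at this
    exact this
  rw [pvScore_eq c c.length _ e hlen]

theorem pvComps_perm (c : List (List Int)) :
    (pvComps c.length [] c.length).Perm
      ((PySem.List.pyRange 0 (c.length : Int) 1).permutations') := by
  have hrng : (PySem.List.pyRange 0 (c.length : Int) 1).Nodup := PySem.List.nodup_pyRange_one _ _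
  have hlenr : (PySem.List.pyRange 0 (c.length : Int) 1).length = c.length := by
    simp [PySem.List.length_pyRange_one]
  have hn1 : (pvComps c.length [] c.length).Nodup := pvNodup_comps _ _ _
  have hn2 : ((PySem.List.pyRange 0 (c.length : Int) 1).permutations').Nodup :=
    ((PySem.List.pyRange 0 (c.length : Int) 1).permutations_perm_permutations').nodup
      (List.nodup_permutations _ hrng)
  rw [List.perm_ext_iff_of_nodup hn1 hn2]
  intro e
  rw [pvMem_comps, List.mem_permutations']
  constructor
  · rintro ⟨hlen, hnd, hall⟩
    have hsub : e ⊆ PySem.List.pyRange 0 (c.length : Int) 1 := by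
      intro x hx
      exact (PySem.List.mem_pyRange_one).mpr ⟨(hall x hx).1, (hall x hx).2.1⟩
    exact (hnd.subperm hsub).perm_of_length_le (by omega)
  · intro hperm
    refine ⟨hperm.length_eq.trans hlenr, hperm.symm.nodup hrng, ?_⟩
    intro x hx
    have := (PySem.List.mem_pyRange_one).mp (hperm.subset hx)
    exact ⟨this.1, this.2, by simp⟩

-- ===== VERDICT (by name: the statement is the Claim_ definition above) =====
theorem maxKennelCompatibility_spec : Claim_equal_maxKennelCompatibility := by
  intro c _ _
  unfold Spec_maxKennelCompatibility
  by_cases hsq : (pvSqrt c.length : Int) * (pvSqrt c.length : Int) = (c.length : Int)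
  · have hsq' : pvSqrt c.length * pvSqrt c.length = c.length := by exact_mod_cast hsq
    rw [pvA_eq c _ rfl hsq', pvB_eq c _ rfl hsq']
    haveI : Std.Commutative (α := Int) max := ⟨max_comm⟩
    haveI : Std.Associative (α := Int) max := ⟨max_assoc⟩
    haveI : RightCommutative (fun (b : Int) (e : List Int) => max b (pvSc c (pvSqrt c.length) e)) := by
      constructor
      intro b x y
      rw [max_assoc, max_comm (pvSc c _ x), ← max_assoc]
    exact (pvComps_perm c).foldl_eq 0
  · unfold maxKennelCompatibility maxKennelCompatibility_alt
    rw [if_pos hsq, if_pos hsq]
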